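-- pv_equiv track=rewrite | github.com/alibaba/agentscope | examples/game/utils.py | format_choices
-- ===== SOURCE A (Python) =====
-- def format_choices(choices):
--     formatted_choices = ""
--     line_length = 0
--
--     for index, choice in enumerate(choices):
--         choice_str = f"[{index + 1}]. {choice}  "
--         choice_length = len(choice_str)
--
--         if line_length + choice_length > 30:
--             formatted_choices += "\n"
--             line_length = 0
--
--         formatted_choices += choice_str
--         line_length += choice_length
--
--     formatted_choices = formatted_choices.rstrip()
--
--     return formatted_choices
-- ===== SOURCE B (Python) =====
-- def format_choices(choices):
--     tokens = ["[%d]. %s  " % (i + 1, c) for i, c in enumerate(choices)]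
--     lines = []
--     i = 0
--     while i < len(tokens):
--         j = i + 1
--         width = len(tokens[i])
--         while j < len(tokens) and width + len(tokens[j]) <= 30:
--             width += len(tokens[j])
--             j += 1
--         lines.append("".join(tokens[i:j]))
--         i = j
--     return "\n".join(lines).rstrip()
-- ===== Notes on version B (the rewrite author's own statement) =====
-- stated objective: alternative
-- what changed: B first formats all tokens, then builds each output line as a maximal chunk of consecutive tokens via a nested take-while scan (always taking at least one token per line) and joins the chunk list, instead of A's single running string accumulator with an overflow-break test before every append; B also drops A's spurious leading empty line.
-- intended difference: When the first choice alone is wider than the 30-column limit (more than 23 characters), A returns the text with a spurious empty first line (a leading newline); B starts the first line with that choice, which is the intended layout. — e.g. on format_choices(["abcdefghijklmnopqrstuvwx"]): A returns "\n[1]. abcdefghijklmnopqrstuvwx", B returns "[1]. abcdefghijklmnopqrstuvwx"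
import Mathlib
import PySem

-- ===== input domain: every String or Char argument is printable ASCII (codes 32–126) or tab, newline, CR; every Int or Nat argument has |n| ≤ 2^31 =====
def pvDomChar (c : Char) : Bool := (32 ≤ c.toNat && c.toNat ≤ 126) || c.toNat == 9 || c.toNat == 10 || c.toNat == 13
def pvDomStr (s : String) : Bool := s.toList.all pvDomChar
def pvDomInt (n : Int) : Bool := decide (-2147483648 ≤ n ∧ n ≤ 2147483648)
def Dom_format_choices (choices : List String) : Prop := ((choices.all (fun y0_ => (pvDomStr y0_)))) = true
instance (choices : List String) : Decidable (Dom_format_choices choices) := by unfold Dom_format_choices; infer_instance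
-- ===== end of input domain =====

-- B groups tokens into maximal lines of width ≤ 30 by a nested take-while scan instead of
-- A's single running accumulator with an overflow break; where A's accidental leading empty
-- line appears (first choice alone wider than the limit), B intentionally omits it (see D_).

-- ===== PORT A =====
-- A's loop body, step for step: build the token, maybe start a new line (reset the counter), append
def fcA_step (st : List Char × Int) (p : Int × String) : List Char × Int :=
  let choiceStr := '[' :: PySem.Int.toChars (p.1 + 1) ++ (']' :: '.' :: ' ' :: p.2.toList) ++ [' ', ' ']
  let choiceLength : Int := choiceStr.length
  let st' := if st.2 + choiceLength > 30 then (st.1 ++ ['\n'], (0 : Int)) else st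
  (st'.1 ++ choiceStr, st'.2 + choiceLength)

def format_choices (choices : List String) : String :=
  let st := (PySem.List.enumerate choices).foldl fcA_step ([], 0)
  String.ofList (PySem.Chars.rstrip st.1)

-- ===== PORT B =====
-- token "[i+1]. c  " as in Source B's list comprehension
def fc_token (p : Int × String) : List Char :=
  '[' :: PySem.Int.toChars (p.1 + 1) ++ [']', '.', ' '] ++ p.2.toList ++ [' ', ' ']

-- Source B's inner while (j, width): extend the current chunk while the next token still fits in 30;
-- returns (tokens of the chunk after the first, remaining tokens)
def fcB_inner (width : Nat) : List (List Char) → List (List Char) × List (List Char)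
  | [] => ([], [])
  | t :: ts =>
      if width + t.length ≤ 30 then
        let p := fcB_inner (width + t.length) ts
        (t :: p.1, p.2)
      else ([], t :: ts)

-- Source B's outer while (i): one maximal chunk per line; the fuel counts loop iterations
-- (the index i strictly advances, so tokens.length iterations always suffice)
def fcB_go : Nat → List (List Char) → List (List Char)
  | _, [] => []
  | 0, _ :: _ => []
  | fuel + 1, t :: ts =>
      let p := fcB_inner t.length ts
      (t ++ p.1.flatten) :: fcB_go fuel p.2

def format_choices_alt (choices : List String) : String :=
  let tokens := (PySem.List.enumerate choices).map fc_token
  String.ofList (PySem.Chars.rstrip (PySem.Chars.join ['\n'] (fcB_go tokens.length tokens)))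

-- ===== PRECONDITION & SPEC =====
-- When the first choice alone is wider than the 30-column limit (> 23 chars, since "[1]. c  " adds 7),
-- A returns the text with a spurious empty first line (a leading "\n"); B starts the first line with
-- that choice, which is the intended layout.
def D_format_choices (choices : List String) : Prop := 23 < (choices.headD "").toList.length
instance (choices : List String) : Decidable (D_format_choices choices) := by unfold D_format_choices; infer_instance

def Spec_format_choices (choices : List String) (out : String) : Prop := ¬ D_format_choices choices → out = format_choices_alt choices
instance (choices : List String) (out : String) : Decidable (Spec_format_choices choices out) := by unfold Spec_format_choices; infer_instance

def pvDiffWitness_format_choices : List String := ["abcdefghijklmnopqrstuvwx"]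
def pvDiffWitnessOut_format_choices : String × String :=
  ("\n[1]. abcdefghijklmnopqrstuvwx", "[1]. abcdefghijklmnopqrstuvwx")

-- ===== CLAIM (what is proved, stated in full; the proofs are below) =====
def Claim_unchanged_format_choices : Prop := ∀ (choices : List String), Dom_format_choices choices → Spec_format_choices choices (format_choices choices)
def Claim_changed_format_choices : Prop := Dom_format_choices (pvDiffWitness_format_choices) ∧ D_format_choices (pvDiffWitness_format_choices) ∧ format_choices (pvDiffWitness_format_choices) = pvDiffWitnessOut_format_choices.1 ∧ format_choices_alt (pvDiffWitness_format_choices) = pvDiffWitnessOut_format_choices.2 ∧ pvDiffWitnessOut_format_choices.1 ≠ pvDiffWitnessOut_format_choices.2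
def Claim_exact_format_choices : Prop := ∀ (choices : List String), Dom_format_choices choices → D_format_choices choices → format_choices choices ≠ format_choices_alt choices

-- ===== LEMMAS AND PROOFS =====

-- A's loop body, re-read as acting on the already-formatted token
def fcA_tok (st : List Char × Int) (tok : List Char) : List Char × Int :=
  let st' := if st.2 + (tok.length : Int) > 30 then (st.1 ++ ['\n'], (0 : Int)) else st
  (st'.1 ++ tok, st'.2 + tok.length)

theorem fcA_step_eq_tok (st : List Char × Int) (p : Int × String) :
    fcA_step st p = fcA_tok st (fc_token p) := by
  simp [fcA_step, fcA_tok, fc_token]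

theorem fc_fold_eq (choices : List String) :
    ((PySem.List.enumerate choices).foldl fcA_step ([], 0)).1 =
      (List.foldl fcA_tok ([], (0 : Int)) ((PySem.List.enumerate choices).map fc_token)).1 := by
  have h : fcA_step = fun st p => fcA_tok st (fc_token p) := by
    funext st p; exact fcA_step_eq_tok st p
  rw [List.foldl_map, h]

theorem fcB_inner_rest_le (ts : List (List Char)) : ∀ (w : Nat), (fcB_inner w ts).2.length ≤ ts.length := by
  induction ts with
  | nil => intro w; simp [fcB_inner]
  | cons t ts ih =>
    intro w
    by_cases h : w + t.length ≤ 30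
    · simp only [fcB_inner, if_pos h]
      exact Nat.le_succ_of_le (ih _)
    · simp [fcB_inner, if_neg h]

-- the inner take-while matches A's accumulation while no break fires
theorem fc_inner_run (ts : List (List Char)) : ∀ (s : List Char) (w : Nat),
    List.foldl fcA_tok (s, (w : Int)) ts =
      List.foldl fcA_tok
        (s ++ (fcB_inner w ts).1.flatten,
          (((w + ((fcB_inner w ts).1.map List.length).sum : Nat)) : Int))
        (fcB_inner w ts).2 := by
  induction ts with
  | nil => intro s w; simp [fcB_inner]
  | cons t ts ih =>
    intro s w
    by_cases h : w + t.length ≤ 30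
    · simp only [fcB_inner, if_pos h]
      have hstep : fcA_tok (s, (w : Int)) t = (s ++ t, (((w + t.length : Nat)) : Int)) := by
        simp only [fcA_tok]
        rw [if_neg (by omega)]
        push_cast; ring_nf
      rw [List.foldl_cons, hstep, ih (s ++ t) (w + t.length)]
      have harith : ((w + t.length + ((fcB_inner (w + t.length) ts).1.map List.length).sum : Nat) : Int)
          = ((w + (t.length + ((fcB_inner (w + t.length) ts).1.map List.length).sum) : Nat) : Int) := by
        push_cast; ring
      rw [harith]
      simp [List.append_assoc]
    · simp only [fcB_inner, if_neg h]
      simp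

-- when the inner scan stops, the token it stopped at does not fit
theorem fc_inner_stop (ts : List (List Char)) : ∀ (w : Nat) (t' : List Char) (ts' : List (List Char)),
    (fcB_inner w ts).2 = t' :: ts' →
    30 < w + ((fcB_inner w ts).1.map List.length).sum + t'.length := by
  induction ts with
  | nil => intro w t' ts' h; simp [fcB_inner] at h
  | cons t ts ih =>
    intro w t' ts' h
    by_cases hf : w + t.length ≤ 30
    · simp only [fcB_inner, if_pos hf] at h ⊢
      have := ih (w + t.length) t' ts' h
      simp only [List.map_cons, List.sum_cons]
      omega
    · simp only [fcB_inner, if_neg hf] at h ⊢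
      obtain ⟨h1, h2⟩ := List.cons.injEq .. ▸ h
      subst h1
      simp only [List.map_nil, List.sum_nil]
      omega

-- the outer loop: when a break is due at once, A produces the '\n'-prefixed lines
theorem fc_outer (fuel : Nat) : ∀ (ts : List (List Char)) (s : List Char) (w : Nat),
    ts.length ≤ fuel →
    (∀ t' ts', ts = t' :: ts' → 30 < w + t'.length) →
    (List.foldl fcA_tok (s, (w : Int)) ts).1 =
      s ++ (fcB_go fuel ts).flatMap (fun l => '\n' :: l) := by
  induction fuel with
  | zero =>
    intro ts s w hlen _
    have : ts = [] := List.length_eq_zero_iff.mp (Nat.le_zero.mp hlen)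
    subst this; simp [fcB_go]
  | succ fuel ih =>
    intro ts s w hlen hbr
    cases ts with
    | nil => simp [fcB_go]
    | cons t ts =>
      have hb : 30 < w + t.length := hbr t ts rfl
      have hstep : fcA_tok (s, (w : Int)) t = (s ++ '\n' :: t, ((t.length : Nat) : Int)) := by
        simp only [fcA_tok]
        rw [if_pos (by omega)]
        simp
      rw [List.foldl_cons, hstep, fc_inner_run ts (s ++ '\n' :: t) t.length]
      have hrest : (fcB_inner t.length ts).2.length ≤ fuel :=
        le_trans (fcB_inner_rest_le ts t.length) (Nat.le_of_succ_le_succ hlen)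
      rw [ih (fcB_inner t.length ts).2 _ _ hrest
            (fun t' ts' h => by
              have := fc_inner_stop ts t.length t' ts' h
              omega)]
      simp only [fcB_go, List.flatMap_cons, List.append_assoc, List.cons_append]

theorem fc_join_cons (ls : List (List Char)) : ∀ (l : List Char),
    PySem.Chars.join ['\n'] (l :: ls) = l ++ ls.flatMap (fun x => '\n' :: x) := by
  induction ls with
  | nil => intro l; simp [PySem.Chars.join_singleton]
  | cons b ls ih =>
    intro l
    rw [PySem.Chars.join_cons_cons, ih b, List.flatMap_cons]
    simp [List.append_assoc]

-- when the first token fits, A's raw text is exactly B's joined lines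
theorem fc_raw_eq (ts : List (List Char))
    (h : ∀ t' ts', ts = t' :: ts' → t'.length ≤ 30) :
    (List.foldl fcA_tok ([], (0 : Int)) ts).1 =
      PySem.Chars.join ['\n'] (fcB_go ts.length ts) := by
  cases ts with
  | nil => simp [fcB_go, PySem.Chars.join, List.intercalate]
  | cons t ts =>
    have hfit : t.length ≤ 30 := h t ts rfl
    have hstep : fcA_tok ([], (0 : Int)) t = (t, ((t.length : Nat) : Int)) := by
      simp only [fcA_tok]
      rw [if_neg (by omega)]
      simp
    rw [List.foldl_cons, hstep, fc_inner_run ts t t.length]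
    rw [fc_outer ts.length (fcB_inner t.length ts).2 _ _
          (fcB_inner_rest_le ts t.length)
          (fun t' ts' hh => by
            have := fc_inner_stop ts t.length t' ts' hh
            omega)]
    simp only [List.length_cons, fcB_go]
    rw [fc_join_cons]

-- when the first token does not fit, A's raw text is '\n' followed by B's joined lines
theorem fc_raw_diff (t : List Char) (ts : List (List Char)) (h : 30 < t.length) :
    (List.foldl fcA_tok ([], (0 : Int)) (t :: ts)).1 =
      '\n' :: PySem.Chars.join ['\n'] (fcB_go (t :: ts).length (t :: ts)) := by
  have hout := fc_outer (t :: ts).length (t :: ts) [] 0 (le_refl _)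
        (fun t' ts' hh => by
          obtain ⟨h1, _⟩ := List.cons.injEq .. ▸ hh
          subst h1; omega)
  simp only [Nat.cast_zero] at hout
  rw [hout]
  simp only [List.length_cons, fcB_go, List.flatMap_cons, List.nil_append]
  rw [fc_join_cons]
  simp

-- rstrip keeps a leading '\n' when something non-blank follows
theorem fc_rstrip_cons (x : List Char) (hx : PySem.Chars.rstrip x ≠ []) :
    PySem.Chars.rstrip ('\n' :: x) = '\n' :: PySem.Chars.rstrip x := by
  have hd : List.dropWhile PySem.Chars.isspace x.reverse ≠ [] := by
    intro h
    exact hx (by simp [PySem.Chars.rstrip, h])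
  simp only [PySem.Chars.rstrip, List.reverse_cons, List.dropWhile_append]
  rw [if_neg (by simpa using hd)]
  simp

theorem fc_rstrip_ne_nil (x : List Char) (c : Char) (hc : c ∈ x) (hws : PySem.Chars.isspace c = false) :
    PySem.Chars.rstrip x ≠ [] := by
  intro h
  have hd : List.dropWhile PySem.Chars.isspace x.reverse = [] := by
    have := congrArg List.reverse h
    simpa [PySem.Chars.rstrip] using this
  have := (List.dropWhile_eq_nil_iff.mp hd) c (by simpa using hc)
  rw [hws] at this
  exact Bool.false_ne_true this

-- the first token's length is 7 plus the choice's length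
theorem fc_token_zero_len (c : String) : (fc_token (0, c)).length = 7 + c.toList.length := by
  have h1 : PySem.Int.toChars 1 = ['1'] := by decide
  simp [fc_token, h1]
  omega

-- ===== VERDICT (by name: the statement is the Claim_ definition above) =====
theorem format_choices_spec : Claim_unchanged_format_choices := by
  intro choices _ hD
  unfold format_choices format_choices_alt
  simp only []
  rw [fc_fold_eq]
  rw [fc_raw_eq]
  intro t' ts' h
  cases choices with
  | nil => simp [PySem.List.enumerate] at h
  | cons c rest =>
    rw [PySem.List.enumerate_cons, List.map_cons] at h
    obtain ⟨h1, _⟩ := List.cons.injEq .. ▸ h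
    have hc : c.toList.length ≤ 23 := by
      unfold D_format_choices at hD
      simpa using Nat.le_of_not_lt (by simpa using hD)
    rw [← h1, fc_token_zero_len]
    omega

theorem format_choices_changed : Claim_changed_format_choices := by
  unfold Claim_changed_format_choices; decide

theorem format_choices_tight : Claim_exact_format_choices := by
  intro choices _ hD
  cases choices with
  | nil => exact absurd hD (by decide)
  | cons c rest =>
    have hc : 23 < c.toList.length := by
      unfold D_format_choices at hD
      simpa using hD
    unfold format_choices format_choices_alt
    simp only []
    rw [fc_fold_eq, PySem.List.enumerate_cons, List.map_cons]
    simp only [zero_add]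
    have hlen : 30 < (fc_token (0, c)).length := by
      rw [fc_token_zero_len]; omega
    rw [fc_raw_diff _ _ hlen]
    set x := PySem.Chars.join ['\n']
      (fcB_go (fc_token (0, c) :: List.map fc_token (PySem.List.enumerate rest 1)).length
        (fc_token (0, c) :: List.map fc_token (PySem.List.enumerate rest 1))) with hxdef
    have hmem : '[' ∈ x := by
      rw [hxdef]
      simp only [List.length_cons, fcB_go]
      rw [fc_join_cons]
      simp [fc_token]
    have hne : PySem.Chars.rstrip x ≠ [] :=
      fc_rstrip_ne_nil x '[' hmem (by decide)
    rw [fc_rstrip_cons x hne]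
    intro heq
    have h2 : ('\n' :: PySem.Chars.rstrip x) = PySem.Chars.rstrip x := by
      simpa using congrArg String.toList heq
    have h3 := congrArg List.length h2
    simp at h3
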